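-- pv_equiv track=rewrite | github.com/zdurczok/code_wars | 7_kyu_Consecutive_Letters.py | solve
-- ===== SOURCE A (Python) =====
-- def solve(st):
--     length = len(st)
--     s = ''.join(sorted(st))
--     for i in range(1, length):
--         if ord(s[i]) - ord(s[i - 1]) != 1:
--             return False
--     else:
--         return True
-- ===== SOURCE B (Python) =====
-- def solve(st):
--     if len(set(st)) != len(st):
--         return False
--     if not st:
--         return True
--     return ord(max(st)) - ord(min(st)) == len(st) - 1
-- ===== Notes on version B (the rewrite author's own statement) =====
-- stated objective: faster
-- what changed: Instead of sorting the string and scanning adjacent pairs, B checks in one pass that the characters are distinct (set size) and that max-min equals len-1.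
import Mathlib
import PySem

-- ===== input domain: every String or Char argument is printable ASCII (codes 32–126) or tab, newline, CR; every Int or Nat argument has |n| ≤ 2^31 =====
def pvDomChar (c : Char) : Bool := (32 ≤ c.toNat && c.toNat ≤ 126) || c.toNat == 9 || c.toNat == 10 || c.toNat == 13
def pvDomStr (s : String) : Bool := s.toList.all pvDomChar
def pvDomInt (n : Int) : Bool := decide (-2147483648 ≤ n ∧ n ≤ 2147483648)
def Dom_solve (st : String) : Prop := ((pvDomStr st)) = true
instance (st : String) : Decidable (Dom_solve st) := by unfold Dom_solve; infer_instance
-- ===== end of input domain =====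

-- B replaces A's sort-then-scan with a one-pass set/min/max check (distinct chars and
-- max - min = len - 1); objective: faster (no sort).

-- ===== PORT A =====
-- the for-loop with early `return False`, over range(1, length)
def solveLoop (s : List Char) : List Int → Bool
  | [] => true
  | i :: rest =>
    match PySem.List.pyGet? s i, PySem.List.pyGet? s (i - 1) with
    | some a, some b =>
        if ((a.toNat : Int) - (b.toNat : Int)) ≠ 1 then false else solveLoop s rest
    | _, _ => false   -- unreachable: every i of range(1, len) is in range

def solve (st : String) : Bool :=
  let length : Int := PySem.Str.len st
  let s : List Char := PySem.List.sorted st.toList (fun c => c) false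
  solveLoop s (PySem.List.pyRange 1 length 1)

-- ===== PORT B =====
def solve_alt (st : String) : Bool :=
  let l : List Char := st.toList
  if PySem.Set.len (PySem.Set.ofList l) ≠ PySem.Str.len st then false
  else if l.isEmpty then true
  else
    match PySem.List.max? l (fun c => c), PySem.List.min? l (fun c => c) with
    | some M, some m => ((M.toNat : Int) - (m.toNat : Int)) == (PySem.Str.len st) - 1
    | _, _ => false   -- unreachable: l is nonempty here

-- ===== PRECONDITION & SPEC =====
def Spec_solve (st : String) (out : Bool) : Prop := out = solve_alt st
instance (st : String) (out : Bool) : Decidable (Spec_solve st out) := by unfold Spec_solve; infer_instance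

-- ===== CLAIM (what is proved, stated in full; the proofs are below) =====
def Claim_equal_solve : Prop := ∀ (st : String), Dom_solve st → Spec_solve st (solve st)

-- ===== LEMMAS AND PROOFS =====

-- adjacent-difference view of A's loop over the sorted list
def adj : List Char → Bool
  | a :: b :: t => (((b.toNat : Int) - (a.toNat : Int)) == 1) && adj (b :: t)
  | _ => true

theorem solveLoop_eq_adj (s : List Char) (k : Nat) :
    solveLoop s (PySem.List.pyRange ((k : Int) + 1) (s.length : Int) 1) = adj (s.drop k) := by
  by_cases hk : k + 1 < s.length
  · have h1 : ((k : Int) + 1) < (s.length : Int) := by exact_mod_cast hk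
    rw [PySem.List.pyRange_one_cons h1]
    have hks : k < s.length := by omega
    have g1 : PySem.List.pyGet? s ((k : Int) + 1) = some s[k+1] := by
      have : ((k : Int) + 1) = ((k + 1 : Nat) : Int) := by push_cast; ring
      rw [this, PySem.List.pyGet?_natCast, List.getElem?_eq_getElem hk]
    have g0 : PySem.List.pyGet? s ((k : Int) + 1 - 1) = some s[k] := by
      have : ((k : Int) + 1 - 1) = ((k : Nat) : Int) := by ring
      rw [this, PySem.List.pyGet?_natCast, List.getElem?_eq_getElem hks]
    have hd : s.drop k = s[k] :: s[k+1] :: s.drop (k+2) := by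
      rw [List.drop_eq_getElem_cons hks, List.drop_eq_getElem_cons hk]
    have ih := solveLoop_eq_adj s (k+1)
    rw [solveLoop, g1, g0, hd, adj]
    have : ((k : Int) + 1 + 1) = ((k + 1 : Nat) : Int) + 1 := by push_cast; ring
    rw [this, ih, List.drop_eq_getElem_cons hk]
    by_cases hdiff : ((s[k+1].toNat : Int) - (s[k].toNat : Int)) = 1 <;> simp [hdiff]
  · have h1 : (s.length : Int) ≤ (k : Int) + 1 := by exact_mod_cast Nat.not_lt.mp hk
    rw [PySem.List.pyRange_one_eq_nil h1, solveLoop]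
    rcases Nat.lt_or_ge k s.length with h | h
    · have : k = s.length - 1 := by omega
      have hd : (s.drop k).length = 1 := by rw [List.length_drop]; omega
      match he : s.drop k, hd with
      | [a], _ => rfl
    · rw [List.drop_eq_nil_of_le h]; rfl
termination_by s.length - k
decreasing_by omega

theorem char_le_toNat {a b : Char} (h : a ≤ b) : a.toNat ≤ b.toNat :=
  UInt32.le_iff_toNat_le.mp (Char.le_def.mp h)

theorem char_toNat_inj {a b : Char} (h : a.toNat = b.toNat) : a = b := by
  apply Char.ext; apply UInt32.toNat_inj.mp; exact h

theorem le_getLast (s : List Char) (b : Char) (hpw : s.Pairwise (· ≤ ·))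
    (hb : s.getLast? = some b) : ∀ x ∈ s, x ≤ b := by
  induction s with
  | nil => simp at hb
  | cons a t ih =>
    intro x hx
    cases t with
    | nil => simp at hb hx; simp [hx, hb]
    | cons c t' =>
      rw [List.getLast?_cons_cons] at hb
      have hb' : b ∈ c :: t' := List.mem_of_getLast? hb
      rcases List.mem_cons.mp hx with rfl | hx'
      · exact (List.pairwise_cons.mp hpw).1 b hb'
      · exact ih (List.pairwise_cons.mp hpw).2 hb x hx'

-- sorted+nodup list: the span is at least the length minus one
theorem gap_ge (s : List Char) (hpw : s.Pairwise (· ≤ ·)) (hnd : s.Nodup)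
    (a b : Char) (ha : s.head? = some a) (hb : s.getLast? = some b) :
    (s.length : Int) - 1 ≤ (b.toNat : Int) - (a.toNat : Int) := by
  induction s generalizing a with
  | nil => simp at ha
  | cons x t ih =>
    simp only [List.head?_cons, Option.some.injEq] at ha
    subst ha
    cases t with
    | nil => simp_all
    | cons c t' =>
      rw [List.getLast?_cons_cons] at hb
      have ih' := ih (List.pairwise_cons.mp hpw).2 (List.Nodup.of_cons hnd) c (by simp) hb
      have hac : x ≤ c := (List.pairwise_cons.mp hpw).1 c (by simp)
      have hne : x ≠ c := by
        intro h; subst h; exact (List.nodup_cons.mp hnd).1 (by simp)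
      have : x.toNat < c.toNat := by
        rcases Nat.lt_or_ge x.toNat c.toNat with h | h
        · exact h
        · exact absurd (char_toNat_inj (Nat.le_antisymm (char_le_toNat hac) h)) hne
      simp only [List.length_cons] at *
      push_cast at *
      omega

-- main characterisation: on a sorted list, A's adjacent check = nodup + full span
theorem adj_iff (s : List Char) (hpw : s.Pairwise (· ≤ ·)) :
    adj s = true ↔
      (s.Nodup ∧ ∀ a b, s.head? = some a → s.getLast? = some b →
        (b.toNat : Int) - (a.toNat : Int) = (s.length : Int) - 1) := by
  induction s with
  | nil => simp [adj]
  | cons x t ih =>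
    cases t with
    | nil => simp [adj]
    | cons c t' =>
      have hpw' := (List.pairwise_cons.mp hpw).2
      have hx := (List.pairwise_cons.mp hpw).1
      have ih' := ih hpw'
      rw [show adj (x :: c :: t') = ((((c.toNat : Int) - (x.toNat : Int)) == 1) && adj (c :: t')) from rfl]
      constructor
      · intro h
        have h1 : ((c.toNat : Int) - (x.toNat : Int)) = 1 := by
          have := (Bool.and_eq_true _ _).mp h |>.1; exact_mod_cast (beq_iff_eq.mp this)
        have h2 := ih'.mp ((Bool.and_eq_true _ _).mp h |>.2)
        obtain ⟨hnd', hspan⟩ := h2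
        refine ⟨List.nodup_cons.mpr ⟨?_, hnd'⟩, ?_⟩
        · intro hmem
          have hle : c ≤ x := by
            rcases List.mem_cons.mp hmem with rfl | hm
            · exact le_refl x
            · exact (List.pairwise_cons.mp hpw').1 x hm
          have := char_le_toNat hle; omega
        · intro a b ha hb
          simp only [List.head?_cons, Option.some.injEq] at ha
          subst ha
          rw [List.getLast?_cons_cons] at hb
          have := hspan c b (by simp) hb
          simp only [List.length_cons] at *
          push_cast at *
          omega
      · rintro ⟨hnd, hspan⟩
        have hnd' := List.Nodup.of_cons hnd
        obtain ⟨b, hb⟩ : ∃ b, (c :: t').getLast? = some b :=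
          ⟨(c :: t').getLast (by simp), List.getLast?_eq_some_getLast (by simp)⟩
        have hspan' := hspan x b (by simp) (by rw [List.getLast?_cons_cons]; exact hb)
        have hgap := gap_ge (c :: t') hpw' hnd' c b (by simp) hb
        have hxc : x ≤ c := hx c (by simp)
        have hxnec : x ≠ c := by intro h; subst h; exact (List.nodup_cons.mp hnd).1 (by simp)
        have hlt : x.toNat < c.toNat := by
          rcases Nat.lt_or_ge x.toNat c.toNat with h | h
          · exact h
          · exact absurd (char_toNat_inj (Nat.le_antisymm (char_le_toNat hxc) h)) hxnec
        have h1 : ((c.toNat : Int) - (x.toNat : Int)) = 1 := by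
          simp only [List.length_cons] at *; push_cast at *; omega
        have h2 : (b.toNat : Int) - (c.toNat : Int) = ((c :: t').length : Int) - 1 := by
          simp only [List.length_cons] at *; push_cast at *; omega
        have hadj : adj (c :: t') = true := by
          apply ih'.mpr
          refine ⟨hnd', ?_⟩
          intro a' b' ha' hb'
          simp only [List.head?_cons, Option.some.injEq] at ha'
          subst ha'
          rw [hb] at hb'
          cases hb'
          exact h2
        simp [h1, hadj]

-- Python's len(set(l)) == len(l) is exactly Nodup
theorem ofList_len_iff (l : List Char) : (PySem.Set.ofList l).length = l.length ↔ l.Nodup := by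
  constructor
  · intro h
    have h1 : (PySem.Set.ofList l).Nodup := PySem.Set.nodup_ofList l
    have h2 : PySem.Set.ofList l ⊆ l := fun x hx => (PySem.Set.mem_ofList l x).mp hx
    have h3 : List.Subperm (PySem.Set.ofList l) l := h1.subperm h2
    have h4 : (PySem.Set.ofList l).Perm l := h3.perm_of_length_le (le_of_eq h.symm)
    exact h4.nodup h1
  · intro h
    rw [PySem.Set.ofList_eq_self_of_nodup l h]

-- ===== VERDICT (by name: the statement is the Claim_ definition above) =====
theorem solve_spec : Claim_equal_solve := by
  intro st _
  unfold Spec_solve solve solve_alt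
  simp only []
  have hlen : PySem.Str.len st = (st.toList.length : Int) := by simp [PySem.Str.len_eq]
  have hperm : (PySem.List.sorted st.toList (fun c => c) false).Perm st.toList :=
    PySem.List.sorted_perm st.toList _ _
  have hpw : (PySem.List.sorted st.toList (fun c => c) false).Pairwise (· ≤ ·) := by
    have := PySem.List.sorted_pairwise st.toList (fun c => c)
    simpa using this
  set s := PySem.List.sorted st.toList (fun c => c) false with hs
  have hslen : s.length = st.toList.length := hperm.length_eq
  have hA : solveLoop s (PySem.List.pyRange 1 (PySem.Str.len st) 1) = adj s := by
    rw [hlen, ← hslen]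
    have := solveLoop_eq_adj s 0
    simpa using this
  rw [hA]
  have hsetlen : PySem.Set.len (PySem.Set.ofList st.toList) = ((PySem.Set.ofList st.toList).length : Int) := by
    simp [PySem.Set.len]
  by_cases hnd : st.toList.Nodup
  · have hset : PySem.Set.len (PySem.Set.ofList st.toList) = PySem.Str.len st := by
      rw [hsetlen, hlen]; exact_mod_cast (ofList_len_iff st.toList).mpr hnd
    rw [if_neg (not_not_intro hset)]
    by_cases hnil : st.toList = []
    · have hsnil : s = [] := by rw [hnil] at hperm; exact hperm.eq_nil
      rw [if_pos (by simp [hnil])]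
      rw [hsnil]; rfl
    · rw [if_neg (by simp [hnil])]
      have hsnil : s ≠ [] := fun h => hnil (by rw [h] at hperm; exact hperm.symm.eq_nil)
      obtain ⟨M, hM⟩ : ∃ M, PySem.List.max? st.toList (fun c => c) = some M := by
        cases hMM : PySem.List.max? st.toList (fun c => c) with
        | none => exact absurd ((PySem.List.max?_eq_none_iff _ _).mp hMM) hnil
        | some M => exact ⟨M, rfl⟩
      obtain ⟨m, hm⟩ : ∃ m, PySem.List.min? st.toList (fun c => c) = some m := by
        cases hmm : PySem.List.min? st.toList (fun c => c) with
        | none => exact absurd ((PySem.List.min?_eq_none_iff _ _).mp hmm) hnil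
        | some m => exact ⟨m, rfl⟩
      rw [hM, hm]
      obtain ⟨h0, t, hst⟩ : ∃ h0 t, s = h0 :: t := List.exists_cons_of_ne_nil hsnil
      obtain ⟨b, hb⟩ : ∃ b, s.getLast? = some b :=
        ⟨s.getLast hsnil, List.getLast?_eq_some_getLast hsnil⟩
      -- M is the last of s
      have hMs : M = b := by
        have hbmem : b ∈ st.toList := hperm.mem_iff.mp (List.mem_of_getLast? hb)
        have hMmem : M ∈ s := hperm.mem_iff.mpr (PySem.List.max?_mem hM)
        have h1 : b ≤ M := by
          have := PySem.List.max?_isMax hM b hbmem; simpa using this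
        have h2 : M ≤ b := le_getLast s b hpw hb M hMmem
        exact le_antisymm h2 h1
      -- m is the head of s
      have hms : m = h0 := by
        have h0mem : h0 ∈ st.toList := hperm.mem_iff.mp (by rw [hst]; simp)
        have hmmem : m ∈ s := hperm.mem_iff.mpr (PySem.List.min?_mem hm)
        have h1 : m ≤ h0 := by
          have := PySem.List.min?_isMin hm h0 h0mem; simpa using this
        have h2 : h0 ≤ m := by
          rw [hst] at hmmem
          rcases List.mem_cons.mp hmmem with rfl | hmm'
          · exact le_refl m
          · exact (List.pairwise_cons.mp (hst ▸ hpw)).1 m hmm'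
        exact le_antisymm h1 h2
      have hsnd : s.Nodup := hperm.symm.nodup hnd
      have hiff := adj_iff s hpw
      by_cases hspan : (b.toNat : Int) - (h0.toNat : Int) = (s.length : Int) - 1
      · have : adj s = true := by
          apply hiff.mpr
          refine ⟨hsnd, ?_⟩
          intro a' b' ha' hb'
          rw [hst] at ha'; simp only [List.head?_cons, Option.some.injEq] at ha'
          rw [hb] at hb'; cases hb'
          subst ha'
          exact hspan
        rw [this]
        have heq : ((M.toNat : Int) - (m.toNat : Int)) = (PySem.Str.len st) - 1 := by
          rw [hMs, hms, hlen, ← hslen]; exact hspan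
        have heq2 : ((M.toNat : Int) - (m.toNat : Int) = (st.length : Int) - 1) := by
          rw [heq, hlen]
          rw [show ((st.toList.length : Int)) = ((st.length : Int)) by exact_mod_cast String.length_toList (s := st)]
        simp [heq2]
      · have : adj s ≠ true := by
          intro hadj
          obtain ⟨_, hsp⟩ := hiff.mp hadj
          exact hspan (hsp h0 b (by rw [hst]; simp) hb)
        have hf : adj s = false := by
          cases h : adj s
          · rfl
          · exact absurd h this
        rw [hf]
        have hne : ((M.toNat : Int) - (m.toNat : Int)) ≠ (PySem.Str.len st) - 1 := by
          rw [hMs, hms, hlen, ← hslen]; exact hspan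
        have hne2 : ¬ ((M.toNat : Int) - (m.toNat : Int) = (st.length : Int) - 1) := by
          intro h; apply hne; rw [hlen]
          rw [show ((st.toList.length : Int)) = ((st.length : Int)) by exact_mod_cast String.length_toList (s := st)]
          exact h
        simp [hne2]
  · have hset : PySem.Set.len (PySem.Set.ofList st.toList) ≠ PySem.Str.len st := by
      rw [hsetlen, hlen]
      intro h
      exact hnd ((ofList_len_iff st.toList).mp (by exact_mod_cast h))
    rw [if_pos hset]
    have hsnd : ¬ s.Nodup := fun h => hnd (hperm.nodup h)
    cases hadj : adj s with
    | false => rfl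
    | true => exact absurd ((adj_iff s hpw).mp hadj).1 hsnd
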